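-- pv_equiv track=rewrite | github.com/mkitzan/terminus | source/commands.py | prepare_row
-- ===== SOURCE A (Python) =====
-- def prepare_row(row):
--     """Formats CSV so commas within quotes are not split upon."""
--     row = row.split(",")
--     st = None
--
--     proc_row = []
--     for i in range(len(row)):
--         if st is None:
--             if row[i][0] == "\"" and row[i][-1] != "\"":
--                 st = i
--             else:
--                 proc_row += [row[i]]
--         elif row[i][-1] == "\"":
--             proc_row += [",".join(row[st:i+1])]
--             st = None
--
--     return proc_row
-- ===== SOURCE B (Python) =====
-- def prepare_row(row):
--     """Formats CSV so commas within quotes are not split upon."""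
--     pieces = row.split(",")
--     n = len(pieces)
--     out = []
--     i = 0
--     while i < n:
--         p = pieces[i]
--         if p.startswith('"') and not p.endswith('"'):
--             j = i + 1
--             while j < n and not pieces[j].endswith('"'):
--                 j += 1
--             if j < n:
--                 out.append(",".join(pieces[i:j + 1]))
--                 i = j + 1
--             else:
--                 i = n
--         else:
--             out.append(p)
--             i += 1
--     return out
-- ===== Notes on version B (the rewrite author's own statement) =====
-- stated objective: alternative
-- what changed: Replaces A's start-index state machine (a flag `st` threaded through one for-loop) by an explicit lookahead decomposition: an outer while over the split fields with an inner scan that finds the closing quoted field, joining the whole quoted run at once.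
import Mathlib
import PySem

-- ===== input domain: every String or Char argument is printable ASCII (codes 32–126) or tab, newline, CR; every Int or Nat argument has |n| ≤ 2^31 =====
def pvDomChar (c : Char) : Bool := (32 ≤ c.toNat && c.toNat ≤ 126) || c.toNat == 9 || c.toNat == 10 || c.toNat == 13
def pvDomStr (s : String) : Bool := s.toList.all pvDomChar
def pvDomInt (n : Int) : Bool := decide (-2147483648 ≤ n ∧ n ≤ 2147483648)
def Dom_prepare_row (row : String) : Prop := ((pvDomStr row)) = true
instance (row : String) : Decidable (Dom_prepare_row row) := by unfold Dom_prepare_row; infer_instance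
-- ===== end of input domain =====

-- B replaces A's start-index state machine by an explicit lookahead loop (inner scan for the
-- closing quoted piece); objective: alternative decomposition, same asymptotic cost.

-- ===== PORT A =====
-- loop body of A's 'for i in range(len(row))': state = (st, proc_row)
def pvAStep (pieces : List String) (acc : Option Nat × List String) (i : Nat) :
    Option Nat × List String :=
  match acc.1 with
  | none =>
      if PySem.Str.pyGet? (pieces.getD i "") 0 = some '"' ∧
         ¬ PySem.Str.pyGet? (pieces.getD i "") (-1) = some '"' then
        (some i, acc.2)
      else
        (none, acc.2 ++ [pieces.getD i ""])
  | some st =>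
      if PySem.Str.pyGet? (pieces.getD i "") (-1) = some '"' then
        (none, acc.2 ++ [PySem.Str.join ","
          (PySem.List.slice pieces (some (st : Int)) (some ((i : Int) + 1)))])
      else
        (some st, acc.2)

def prepare_row (row : String) : List String :=
  -- row = row.split(","): the separator is the literal "," ≠ "", so split? is always `some`
  let pieces := (PySem.Str.split? row ",").getD []
  ((List.range pieces.length).foldl (pvAStep pieces) (none, [])).2

-- ===== PORT B =====
-- inner 'while j < n and not pieces[j].endswith('"'): j += 1' of Source B;
-- the first Nat argument is fuel (= n - j at each call), a totality guard only
def pvFindClose (pieces : List String) (n : Nat) : Nat → Nat → Nat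
  | 0, j => j
  | fuel + 1, j =>
      if j < n ∧ PySem.Str.endswith (pieces.getD j "") "\"" = false then
        pvFindClose pieces n fuel (j + 1)
      else j

-- outer 'while i < n' of Source B; the first Nat argument is fuel (≥ n - i), a totality guard only
def pvAltLoop (pieces : List String) (n : Nat) : Nat → Nat → List String → List String
  | 0, _, out => out
  | fuel + 1, i, out =>
      if i < n then
        let p := pieces.getD i ""
        if PySem.Str.startswith p "\"" = true ∧ PySem.Str.endswith p "\"" = false then
          let j := pvFindClose pieces n (n - (i + 1)) (i + 1)
          if j < n then
            pvAltLoop pieces n fuel (j + 1)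
              (out ++ [PySem.Str.join ","
                (PySem.List.slice pieces (some (i : Int)) (some ((j : Int) + 1)))])
          else out
        else pvAltLoop pieces n fuel (i + 1) (out ++ [p])
      else out

def prepare_row_alt (row : String) : List String :=
  let pieces := (PySem.Str.split? row ",").getD []
  pvAltLoop pieces pieces.length pieces.length 0 []

-- ===== PRECONDITION & SPEC =====
-- Pre_ excludes exactly the rows with an empty comma-separated field: there Python A raises
-- IndexError on row[i][0] / row[i][-1] and returns no value.
def Pre_prepare_row (row : String) : Prop := ¬ "" ∈ (PySem.Str.split? row ",").getD []
instance (row : String) : Decidable (Pre_prepare_row row) := by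
  unfold Pre_prepare_row; infer_instance

def pvWitness_prepare_row : String := "a,\"b, c\",d"

def Spec_prepare_row (row : String) (out : List String) : Prop := out = prepare_row_alt row
instance (row : String) (out : List String) : Decidable (Spec_prepare_row row out) := by
  unfold Spec_prepare_row; infer_instance

-- ===== CLAIM (what is proved, stated in full; the proofs are below) =====
def Claim_equal_prepare_row : Prop :=
  ∀ (row : String), Dom_prepare_row row → Pre_prepare_row row →
    Spec_prepare_row row (prepare_row row)

-- ===== LEMMAS AND PROOFS =====

-- 'p[0] == ''"''' agrees with 'p.startswith(''"'')' on nonempty p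
theorem pv_start_iff (p : String) (hp : p ≠ "") :
    (PySem.Str.pyGet? p 0 = some '"') ↔ (PySem.Str.startswith p "\"" = true) := by
  have hl : p.toList ≠ [] := by simpa using hp
  rw [PySem.Str.startswith_eq, PySem.Chars.startswith_iff]
  cases hq : p.toList with
  | nil => exact absurd hq hl
  | cons a t =>
      constructor
      · intro h
        simp [PySem.Str.pyGet?_eq, PySem.Chars.pyGet?_eq_listPyGet?, hq] at h
        simp [h, List.prefix_cons_iff]
      · intro h
        simp [List.prefix_cons_iff] at h
        simp [PySem.Str.pyGet?_eq, PySem.Chars.pyGet?_eq_listPyGet?, hq, h.symm]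

-- 'p[-1] == ''"''' agrees with 'p.endswith(''"'')' on nonempty p
theorem pv_end_iff (p : String) (hp : p ≠ "") :
    (PySem.Str.pyGet? p (-1) = some '"') ↔ (PySem.Str.endswith p "\"" = true) := by
  have hl : p.toList ≠ [] := by simpa using hp
  rw [PySem.Str.endswith_eq, PySem.Chars.endswith_iff]
  rw [PySem.Str.pyGet?_eq, PySem.Chars.pyGet?_eq_listPyGet?, PySem.List.pyGet?_neg_one]
  constructor
  · intro h
    rcases List.getLast?_eq_some_iff.mp h with ⟨l', hl'⟩
    exact ⟨l', by rw [hl']; rfl⟩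
  · rintro ⟨t, ht⟩
    rw [← ht]
    simp

-- nonemptiness of each indexed piece, from Pre_
theorem pv_piece_ne (pieces : List String) (hP : ¬ "" ∈ pieces) {i : Nat}
    (h : i < pieces.length) : pieces.getD i "" ≠ "" := by
  rw [List.getD_eq_getElem pieces "" h]
  intro he
  exact hP (he ▸ List.getElem_mem h)

-- the inner scan never moves backwards
theorem pvFindClose_ge (pieces : List String) (n : Nat) :
    ∀ (fuel j : Nat), j ≤ pvFindClose pieces n fuel j := by
  intro fuel
  induction fuel with
  | zero => intro j; simp [pvFindClose]
  | succ fuel ih =>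
      intro j
      rw [pvFindClose]
      split
      · exact Nat.le_trans (Nat.le_succ j) (ih (j + 1))
      · exact Nat.le_refl j

-- A's fold from a quoted-open state scans to the first closing piece (= pvFindClose)
theorem pv_fold_some (pieces : List String) (hP : ¬ "" ∈ pieces) :
    ∀ (k i s : Nat) (pr : List String), i + k = pieces.length →
      (List.foldl (pvAStep pieces) (some s, pr) (List.range' i k)).2 =
        (if pvFindClose pieces pieces.length (pieces.length - i) i < pieces.length then
          (List.foldl (pvAStep pieces)
            (none, pr ++ [PySem.Str.join ","
              (PySem.List.slice pieces (some (s : Int))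
                (some ((pvFindClose pieces pieces.length (pieces.length - i) i : Int) + 1)))])
            (List.range' (pvFindClose pieces pieces.length (pieces.length - i) i + 1)
              (pieces.length - (pvFindClose pieces pieces.length (pieces.length - i) i + 1)))).2
        else pr) := by
  intro k
  induction k with
  | zero =>
      intro i s pr hik
      have h0 : pieces.length - i = 0 := by omega
      rw [h0, pvFindClose]
      simp [show ¬ i < pieces.length by omega]
  | succ k ih =>
      intro i s pr hik
      have hi : i < pieces.length := by omega
      have hpne := pv_piece_ne pieces hP hi
      have hfs : pieces.length - i = (pieces.length - (i + 1)) + 1 := by omega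
      rw [List.range'_succ, List.foldl_cons, hfs, pvFindClose]
      by_cases hend : PySem.Str.endswith (pieces.getD i "") "\"" = false
      · -- not a closing piece: A keeps the open state, the scan moves on
        have hcond : i < pieces.length ∧
            PySem.Str.endswith (pieces.getD i "") "\"" = false := ⟨hi, hend⟩
        rw [if_pos hcond]
        have hA : pvAStep pieces (some s, pr) i = (some s, pr) := by
          simp only [pvAStep]
          rw [if_neg]
          intro hc
          rw [pv_end_iff _ hpne, hend] at hc
          exact Bool.false_ne_true hc
        rw [hA]
        exact ih (i + 1) s pr (by omega)
      · -- closing piece: A emits the join and resets; the scan stops here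
        have hncond : ¬ (i < pieces.length ∧
            PySem.Str.endswith (pieces.getD i "") "\"" = false) := fun h => hend h.2
        rw [if_neg hncond]
        have hend' : PySem.Str.endswith (pieces.getD i "") "\"" = true := by
          revert hend; cases PySem.Str.endswith (pieces.getD i "") "\"" <;> simp
        have hA : pvAStep pieces (some s, pr) i =
            (none, pr ++ [PySem.Str.join ","
              (PySem.List.slice pieces (some (s : Int)) (some ((i : Int) + 1)))]) := by
          simp only [pvAStep]
          rw [if_pos ((pv_end_iff _ hpne).mpr hend')]
        rw [hA, if_pos hi, show pieces.length - (i + 1) = k from by omega]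

-- A's fold from the neutral state IS B's lookahead loop (fuel ≥ remaining iterations)
theorem pv_fold_none (pieces : List String) (hP : ¬ "" ∈ pieces) :
    ∀ (k fuel i : Nat) (pr : List String), i + k = pieces.length → k ≤ fuel →
      (List.foldl (pvAStep pieces) (none, pr) (List.range' i k)).2 =
        pvAltLoop pieces pieces.length fuel i pr := by
  intro k
  induction k using Nat.strong_induction_on with
  | _ k ih =>
    intro fuel i pr hik hf
    match k, fuel with
    | 0, 0 => simp [pvAltLoop]
    | 0, fuel + 1 =>
        simp [pvAltLoop, show ¬ i < pieces.length by omega]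
    | k + 1, fuel + 1 =>
        have hi : i < pieces.length := by omega
        have hpne := pv_piece_ne pieces hP hi
        rw [List.range'_succ, List.foldl_cons]
        simp only [pvAltLoop]
        rw [if_pos hi]
        by_cases hopen : PySem.Str.startswith (pieces.getD i "") "\"" = true ∧
            PySem.Str.endswith (pieces.getD i "") "\"" = false
        · -- opening piece: A records st = i, B scans ahead
          have hA : pvAStep pieces (none, pr) i = (some i, pr) := by
            simp only [pvAStep]
            rw [if_pos]
            refine ⟨(pv_start_iff _ hpne).mpr hopen.1, ?_⟩
            intro hc
            rw [pv_end_iff _ hpne, hopen.2] at hc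
            exact Bool.false_ne_true hc
          rw [hA, pv_fold_some pieces hP k (i + 1) i pr (by omega)]
          rw [if_pos hopen]
          have hji : i + 1 ≤ pvFindClose pieces pieces.length (pieces.length - (i + 1)) (i + 1) :=
            pvFindClose_ge pieces pieces.length _ (i + 1)
          by_cases hjn :
              pvFindClose pieces pieces.length (pieces.length - (i + 1)) (i + 1) < pieces.length
          · rw [if_pos hjn, if_pos hjn]
            exact ih _ (by omega) fuel _ _ (by omega) (by omega)
          · rw [if_neg hjn, if_neg hjn]
        · -- ordinary piece: both append it and move one step
          have hA : pvAStep pieces (none, pr) i =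
              (none, pr ++ [pieces.getD i ""]) := by
            simp only [pvAStep]
            rw [if_neg]
            rintro ⟨h0, h1⟩
            rw [pv_start_iff _ hpne] at h0
            refine hopen ⟨h0, ?_⟩
            revert h1
            rw [pv_end_iff _ hpne]
            cases PySem.Str.endswith (pieces.getD i "") "\"" <;> simp
          rw [hA, if_neg hopen]
          exact ih k (by omega) fuel (i + 1) (pr ++ [pieces.getD i ""]) (by omega) (by omega)

-- ===== VERDICT (by name: the statement is the Claim_ definition above) =====
theorem prepare_row_spec : Claim_equal_prepare_row := by
  intro row _ hpre
  unfold Pre_prepare_row at hpre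
  show prepare_row row = prepare_row_alt row
  simp only [prepare_row, prepare_row_alt, List.range_eq_range']
  exact pv_fold_none _ hpre _ _ 0 [] (by omega) (by omega)
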